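-- pv_equiv track=rewrite | github.com/chochsky/GOA-Course | level96/homework/hw4.py | delete_nth
-- ===== SOURCE A (Python) =====
-- def delete_nth(order, max_e):
--     counts = {}
--     result = []
--
--     for num in order:
--         if counts.get(num, 0) < max_e:
--             result.append(num)
--             counts[num] = counts.get(num, 0) + 1
--
--     return result
-- ===== SOURCE B (Python) =====
-- def delete_nth(order, max_e):
--     if max_e <= 0:
--         return []
--     positions = {}
--     for i, num in enumerate(order):
--         positions.setdefault(num, []).append(i)
--     keep = []
--     for idxs in positions.values():
--         keep.extend(idxs[:max_e])
--     keep.sort()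
--     return [order[i] for i in keep]
-- ===== Notes on version B (the rewrite author's own statement) =====
-- stated objective: alternative
-- what changed: Replaces A's single streaming pass with a running counter dict by a staged group/truncate/sort algorithm: group each value's occurrence indices, keep only the first max_e indices per value, sort the kept indices, and map them back to elements.
import Mathlib
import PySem

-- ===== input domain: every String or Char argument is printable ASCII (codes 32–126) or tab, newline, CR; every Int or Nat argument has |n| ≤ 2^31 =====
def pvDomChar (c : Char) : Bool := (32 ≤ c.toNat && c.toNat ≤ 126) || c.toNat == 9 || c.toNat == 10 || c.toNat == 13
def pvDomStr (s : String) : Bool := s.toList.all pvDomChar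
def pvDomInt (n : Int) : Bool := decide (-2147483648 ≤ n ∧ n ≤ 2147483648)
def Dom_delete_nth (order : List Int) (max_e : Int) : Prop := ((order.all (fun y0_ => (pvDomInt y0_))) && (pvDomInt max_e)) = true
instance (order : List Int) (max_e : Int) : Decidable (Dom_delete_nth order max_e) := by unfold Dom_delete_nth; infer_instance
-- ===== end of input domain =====

-- B replaces A's single streaming pass with a maintained counter dict by a staged
-- group/truncate/sort algorithm: group occurrence indices per value, keep the first
-- max_e indices of each, sort the kept indices, map back (alternative, not faster).

-- ===== PORT A =====
def delete_nth (order : List Int) (max_e : Int) : List Int :=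
  (order.foldl
    (fun (st : PySem.Dict Int Int × List Int) num =>
      if st.1.getD num 0 < max_e then
        (st.1.insert num (st.1.getD num 0 + 1), st.2 ++ [num])
      else st)
    (PySem.Dict.empty, [])).2

-- ===== PORT B =====
-- positions.setdefault(num, []).append(i) is Dict.modify num [] (· ++ [i]);
-- the kept indices are valid positions of order, so pyGetD's default is never used.
def delete_nth_alt (order : List Int) (max_e : Int) : List Int :=
  if max_e ≤ 0 then []
  else
    let positions : PySem.Dict Int (List Int) :=
      (PySem.List.enumerate order 0).foldl
        (fun d p => d.modify p.2 [] (· ++ [p.1])) PySem.Dict.empty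
    let keep : List Int :=
      positions.values.foldl
        (fun acc idxs => acc ++ PySem.List.slice idxs none (some max_e)) []
    (PySem.List.sorted keep (fun x => x) false).map (fun i => PySem.List.pyGetD order i 0)

-- ===== PRECONDITION & SPEC =====
def Spec_delete_nth (order : List Int) (max_e : Int) (out : List Int) : Prop := out = delete_nth_alt order max_e
instance (order : List Int) (max_e : Int) (out : List Int) : Decidable (Spec_delete_nth order max_e out) := by unfold Spec_delete_nth; infer_instance

-- ===== CLAIM (what is proved, stated in full; the proofs are below) =====
def Claim_equal_delete_nth : Prop := ∀ (order : List Int) (max_e : Int), Dom_delete_nth order max_e → Spec_delete_nth order max_e (delete_nth order max_e)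

-- ===== LEMMAS AND PROOFS =====

def Cnd (order : List Int) (max_e : Int) (p : Int × Int) : Bool :=
  decide ((((PySem.List.enumerate order 0).filter
      (fun q => q.2 == p.2 && decide (q.1 < p.1))).length : Int) < max_e)

lemma cnd_at (max_e : Int) (pre : List Int) (n : Int) (rs : List Int) :
    Cnd (pre ++ n :: rs) max_e ((pre.length : Int), n)
      = decide (((pre.count n : Int)) < max_e) := by
  unfold Cnd
  rw [PySem.List.enumerate_append, List.filter_append]
  have h1 : (PySem.List.enumerate pre 0).filter
      (fun q => q.2 == n && decide (q.1 < ((pre.length : Int), n).1))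
      = (PySem.List.enumerate pre 0).filter (fun q => q.2 == n) := by
    apply List.filter_congr
    intro q hq
    obtain ⟨k, hk, rfl⟩ := (PySem.List.mem_enumerate_iff _ _ _).1 hq
    simp only [zero_add]
    have : ((k : Int) < (pre.length : Int)) := by exact_mod_cast hk
    simp [this]
  have h2 : (PySem.List.enumerate (n :: rs) (0 + (pre.length : Int))).filter
      (fun q => q.2 == n && decide (q.1 < ((pre.length : Int), n).1)) = [] := by
    apply List.filter_eq_nil_iff.2
    intro q hq
    obtain ⟨k, hk, rfl⟩ := (PySem.List.mem_enumerate_iff _ _ _).1 hq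
    simp
  rw [h1, h2, List.append_nil]
  have h3 : ((PySem.List.enumerate pre 0).filter (fun q => q.2 == n)).length
      = pre.count n := by
    rw [← List.countP_eq_length_filter]
    have : (fun (q : Int × Int) => q.2 == n) = ((fun x => x == n) ∘ Prod.snd) := rfl
    rw [this, ← List.countP_map, PySem.List.map_snd_enumerate]
    simp [List.count]
  rw [h3]

def dnGo (max_e : Int) (pre rest : List Int) : List Int :=
  match rest with
  | [] => []
  | n :: rs => (if (pre.count n : Int) < max_e then [n] else []) ++ dnGo max_e (pre ++ [n]) rs

lemma dnGo_eq_kept (max_e : Int) :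
    ∀ (rest pre : List Int),
    dnGo max_e pre rest
      = ((PySem.List.enumerate rest ((pre.length : Int))).filter
          (fun p => Cnd (pre ++ rest) max_e p)).map Prod.snd := by
  intro rest
  induction rest with
  | nil => intro pre; simp [dnGo, PySem.List.enumerate_nil]
  | cons n rs ih =>
    intro pre
    rw [PySem.List.enumerate_cons, List.filter_cons]
    have hass : pre ++ n :: rs = (pre ++ [n]) ++ rs := by simp
    have hc : Cnd (pre ++ n :: rs) max_e ((pre.length : Int), n)
        = decide (((pre.count n : Int)) < max_e) := cnd_at max_e pre n rs
    have hlen : (pre.length : Int) + 1 = (((pre ++ [n]).length : Nat) : Int) := by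
      simp
    have htail : dnGo max_e (pre ++ [n]) rs
        = ((PySem.List.enumerate rs ((pre.length : Int) + 1)).filter
            (fun p => Cnd (pre ++ n :: rs) max_e p)).map Prod.snd := by
      rw [hlen, ih (pre ++ [n]), ← hass]
    by_cases h : ((pre.count n : Int)) < max_e
    · rw [show dnGo max_e pre (n :: rs) = [n] ++ dnGo max_e (pre ++ [n]) rs by
        simp [dnGo, h]]
      rw [htail, hc]
      simp [h]
    · rw [show dnGo max_e pre (n :: rs) = dnGo max_e (pre ++ [n]) rs by
        simp [dnGo, h]]
      rw [htail, hc]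
      simp [h]

def posOf (order : List Int) (v : Int) : List Int :=
  ((PySem.List.enumerate order 0).filter (fun q => q.2 == v)).map Prod.fst

def kept (order : List Int) (max_e : Int) : List (Int × Int) :=
  (PySem.List.enumerate order 0).filter (Cnd order max_e)

-- the grouping loop of B: its lookup at v is the positions of v in the processed part
lemma getD_fold_pos (v : Int) :
    ∀ (l : List (Int × Int)) (d : PySem.Dict Int (List Int)),
    (l.foldl (fun d p => d.modify p.2 [] (· ++ [p.1])) d).getD v []
      = d.getD v [] ++ (l.filter (fun q => q.2 == v)).map Prod.fst := by
  intro l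
  induction l with
  | nil => intro d; simp
  | cons p l ih =>
    intro d
    rw [List.foldl_cons, ih, List.filter_cons]
    by_cases h : p.2 = v
    · rw [PySem.Dict.getD_modify]
      simp [h]
    · rw [PySem.Dict.getD_modify]
      simp [h, Ne.symm h]

lemma values_positions (order : List Int) :
    ((PySem.List.enumerate order 0).foldl
        (fun d p => d.modify p.2 [] (· ++ [p.1])) PySem.Dict.empty).values
      = (PySem.Set.ofList order).map (posOf order) := by
  set D := (PySem.List.enumerate order 0).foldl
      (fun d p => d.modify p.2 [] (· ++ [p.1])) PySem.Dict.empty with hD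
  have hnd : D.keys.Nodup := by
    exact PySem.Dict.nodup_keys_foldl_modify_key _ _ _ _ _ PySem.Dict.nodup_keys_empty
  have hkeys : D.keys = PySem.Set.ofList order := by
    rw [hD, PySem.Dict.keys_foldl_modify_key, PySem.Dict.keys_empty,
      PySem.List.map_snd_enumerate, PySem.Set.update_nil_left]
  rw [PySem.Dict.values_eq_map_keys D hnd [], hkeys]
  apply List.map_congr_left
  intro v _
  rw [hD, getD_fold_pos, PySem.Dict.getD_empty]
  simp [posOf]

lemma pw_filter_map (order : List Int) (pr : Int × Int → Bool) :
    (((PySem.List.enumerate order 0).filter pr).map Prod.fst).Pairwise (· < ·) :=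
  List.pairwise_map.mpr ((PySem.List.pairwise_lt_enumerate order 0).filter pr)

lemma mem_posOf (order : List Int) (v j : Int) :
    j ∈ posOf order v ↔ (j, v) ∈ PySem.List.enumerate order 0 := by
  unfold posOf
  constructor
  · intro hj
    obtain ⟨q, hq, rfl⟩ := List.mem_map.1 hj
    obtain ⟨hq1, hq2⟩ := List.mem_filter.1 hq
    have : q = (q.1, v) := by
      have := beq_iff_eq.1 hq2; exact Prod.ext rfl this
    rwa [← this]
  · intro hj
    exact List.mem_map.2 ⟨(j, v), List.mem_filter.2 ⟨hj, by simp⟩, rfl⟩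

lemma en_fst_inj (order : List Int) (j v v' : Int)
    (h1 : (j, v) ∈ PySem.List.enumerate order 0)
    (h2 : (j, v') ∈ PySem.List.enumerate order 0) : v = v' := by
  obtain ⟨k, hk, hkeq⟩ := (PySem.List.mem_enumerate_iff _ _ _).1 h1
  obtain ⟨k', hk', hkeq'⟩ := (PySem.List.mem_enumerate_iff _ _ _).1 h2
  have e1 : j = 0 + (k : Int) := congrArg Prod.fst hkeq
  have e1' : j = 0 + (k' : Int) := congrArg Prod.fst hkeq'
  have : k = k' := by omega
  subst this
  have := congrArg Prod.snd hkeq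
  have := congrArg Prod.snd hkeq'
  simp_all

lemma en_snd_mem (order : List Int) (j v : Int)
    (h : (j, v) ∈ PySem.List.enumerate order 0) : v ∈ order := by
  obtain ⟨k, hk, hkeq⟩ := (PySem.List.mem_enumerate_iff _ _ _).1 h
  have := congrArg Prod.snd hkeq
  simp at this
  subst this
  exact order.getElem_mem hk

lemma take_mem_pairwise :
    ∀ (l : List Int) (m : Nat) (j : Int), l.Pairwise (· < ·) →
    (j ∈ l.take m ↔ j ∈ l ∧ (l.filter (fun x => decide (x < j))).length < m) := by
  intro l
  induction l with
  | nil => intro m j _; simp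
  | cons x t ih =>
    intro m j hpw
    have hx : ∀ y ∈ t, x < y := fun y hy => List.rel_of_pairwise_cons hpw hy
    have ht : t.Pairwise (· < ·) := hpw.tail
    match m with
    | 0 => simp
    | Nat.succ m' =>
      rw [List.take_succ_cons, List.filter_cons]
      by_cases hjx : j = x
      · subst hjx
        have hflt : t.filter (fun x => decide (x < j)) = [] := by
          apply List.filter_eq_nil_iff.2
          intro y hy
          simp only [decide_eq_true_eq]
          exact not_lt.2 (le_of_lt (hx y hy))
        simp [hflt]
      · by_cases hlt : x < j
        · rw [if_pos (by simpa using hlt)]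
          simp only [List.mem_cons, hjx, false_or, List.length_cons, Nat.succ_lt_succ_iff]
          exact ih m' j ht
        · rw [if_neg (by simpa using hlt)]
          have hnt : j ∉ t := fun hjt => hlt (hx j hjt)
          constructor
          · intro hmem
            rcases List.mem_cons.1 hmem with h | h
            · exact absurd h hjx
            · exact absurd (List.mem_of_mem_take h) hnt
          · rintro ⟨hmem, -⟩
            rcases List.mem_cons.1 hmem with h | h
            · exact absurd h hjx
            · exact absurd h hnt

lemma posOf_rank (order : List Int) (j v : Int) :
    ((posOf order v).filter (fun x => decide (x < j))).length
      = ((PySem.List.enumerate order 0).filter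
          (fun q => q.2 == v && decide (q.1 < j))).length := by
  unfold posOf
  rw [List.filter_map, List.length_map, List.filter_filter]
  congr 1
  apply List.filter_congr
  intro q _
  simp [Bool.and_comm]

lemma mem_take_posOf_iff (order : List Int) (max_e : Int) (h : 0 < max_e)
    (v j : Int) :
    j ∈ (posOf order v).take max_e.toNat
      ↔ (j, v) ∈ PySem.List.enumerate order 0 ∧ Cnd order max_e (j, v) = true := by
  have hpw : (posOf order v).Pairwise (· < ·) := pw_filter_map order _
  rw [take_mem_pairwise (posOf order v) max_e.toNat j hpw, mem_posOf, posOf_rank]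
  unfold Cnd
  have hm : (max_e.toNat : Int) = max_e := Int.toNat_of_nonneg (le_of_lt h)
  constructor
  · rintro ⟨h1, h2⟩
    refine ⟨h1, ?_⟩
    simp only [decide_eq_true_eq]
    omega
  · rintro ⟨h1, h2⟩
    refine ⟨h1, ?_⟩
    simp only [decide_eq_true_eq] at h2
    omega

lemma mem_K_iff (order : List Int) (max_e : Int) (j : Int) :
    j ∈ (kept order max_e).map Prod.fst
      ↔ ∃ v, (j, v) ∈ PySem.List.enumerate order 0 ∧ Cnd order max_e (j, v) = true := by
  unfold kept
  constructor
  · intro hj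
    obtain ⟨p, hp, rfl⟩ := List.mem_map.1 hj
    obtain ⟨hp1, hp2⟩ := List.mem_filter.1 hp
    exact ⟨p.2, hp1, hp2⟩
  · rintro ⟨v, h1, h2⟩
    exact List.mem_map.2 ⟨(j, v), List.mem_filter.2 ⟨h1, h2⟩, rfl⟩

lemma keep_perm_K (order : List Int) (max_e : Int) (h : 0 < max_e) :
    ((PySem.Set.ofList order).flatMap
        (fun v => (posOf order v).take max_e.toNat)).Perm
      ((kept order max_e).map Prod.fst) := by
  apply (List.perm_ext_iff_of_nodup ?_ ?_).2
  · intro j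
    rw [List.mem_flatMap, mem_K_iff]
    constructor
    · rintro ⟨v, _, hj⟩
      obtain ⟨h1, h2⟩ := (mem_take_posOf_iff order max_e h v j).1 hj
      exact ⟨v, h1, h2⟩
    · rintro ⟨v, h1, h2⟩
      exact ⟨v, (PySem.Set.mem_ofList _ _).2 (en_snd_mem order j v h1),
        (mem_take_posOf_iff order max_e h v j).2 ⟨h1, h2⟩⟩
  · apply List.nodup_flatMap.2
    constructor
    · intro v _
      exact ((pw_filter_map order _).sublist (List.take_sublist _ _)).imp ne_of_lt
    · apply (PySem.Set.nodup_ofList order).pairwise_of_forall_ne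
      intro v hv v' hv' hne j hjv hjv'
      have h1 := ((mem_take_posOf_iff order max_e h v j).1 hjv).1
      have h2 := ((mem_take_posOf_iff order max_e h v' j).1 hjv').1
      exact hne (en_fst_inj order j v v' h1 h2)
  · exact ((pw_filter_map order _)).imp ne_of_lt

lemma dnGo_nonpos (max_e : Int) (h : max_e ≤ 0) :
    ∀ (rest pre : List Int), dnGo max_e pre rest = [] := by
  intro rest
  induction rest with
  | nil => intro pre; simp [dnGo]
  | cons n rs ih =>
    intro pre
    have : ¬ ((pre.count n : Int) < max_e) := by
      have : (0 : Int) ≤ (pre.count n : Int) := Int.natCast_nonneg _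
      omega
    simp [dnGo, this, ih]

lemma map_fst_kept_vals (order : List Int) (max_e : Int) :
    ((kept order max_e).map Prod.fst).map (fun i => PySem.List.pyGetD order i 0)
      = (kept order max_e).map Prod.snd := by
  rw [List.map_map]
  apply List.map_congr_left
  intro p hp
  have hpen : p ∈ PySem.List.enumerate order 0 := List.mem_filter.1 hp |>.1
  obtain ⟨k, hk, rfl⟩ := (PySem.List.mem_enumerate_iff _ _ _).1 hpen
  simp only [Function.comp_apply, zero_add]
  rw [PySem.List.pyGetD_natCast]
  exact List.getD_eq_getElem _ _ hk
lemma dnA_eq (max_e : Int) :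
    ∀ (rest pre : List Int) (counts : PySem.Dict Int Int) (acc : List Int),
    (∀ x, counts.getD x 0 = min (pre.count x : Int) (max max_e 0)) →
    (rest.foldl
      (fun (st : PySem.Dict Int Int × List Int) num =>
        if st.1.getD num 0 < max_e then
          (st.1.insert num (st.1.getD num 0 + 1), st.2 ++ [num])
        else st)
      (counts, acc)).2 = acc ++ dnGo max_e pre rest := by
  intro rest
  induction rest with
  | nil => intro pre counts acc _; simp [dnGo]
  | cons n rs ih =>
    intro pre counts acc hinv
    have hc : counts.getD n 0 < max_e ↔ ((pre.count n : Int)) < max_e := by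
      rw [hinv n]; omega
    by_cases h : ((pre.count n : Int)) < max_e
    · have h' : counts.getD n 0 < max_e := hc.mpr h
      have hinv' : ∀ x, (counts.insert n (counts.getD n 0 + 1)).getD x 0
          = min (((pre ++ [n]).count x : Int)) (max max_e 0) := by
        intro x
        rw [PySem.Dict.getD_insert, List.count_append]
        by_cases hx : x = n
        · subst hx; simp [hinv x]; omega
        · simp [hx, Ne.symm hx, hinv x]
      simp only [List.foldl_cons, if_pos h', dnGo, if_pos h]
      rw [ih (pre ++ [n]) _ _ hinv']
      simp
    · have h' : ¬ counts.getD n 0 < max_e := fun hh => h (hc.mp hh)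
      have hinv' : ∀ x, counts.getD x 0 = min (((pre ++ [n]).count x : Int)) (max max_e 0) := by
        intro x
        rw [hinv x, List.count_append]
        by_cases hx : x = n
        · subst hx
          have hcnt : ¬ ((pre.count x : Int)) < max_e := h
          simp
          omega
        · rw [List.count_singleton]; simp [beq_iff_eq, Ne.symm hx]
      simp only [List.foldl_cons, if_neg h', dnGo, if_neg h]
      rw [ih (pre ++ [n]) _ _ hinv']
      simp

lemma dn_eq (order : List Int) (max_e : Int) :
    delete_nth order max_e = delete_nth_alt order max_e := by
  have hA : delete_nth order max_e = dnGo max_e [] order := by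
    unfold delete_nth
    rw [dnA_eq max_e order [] PySem.Dict.empty [] (by
      intro x; rw [PySem.Dict.getD_empty]; simp)]
    simp
  by_cases h : max_e ≤ 0
  · rw [hA, dnGo_nonpos max_e h order []]
    simp [delete_nth_alt, h]
  · have hpos : 0 < max_e := by omega
    have hAk : delete_nth order max_e = (kept order max_e).map Prod.snd := by
      rw [hA, dnGo_eq_kept max_e order []]
      unfold kept
      simp
    rw [hAk]
    unfold delete_nth_alt
    rw [if_neg h]
    simp only []
    rw [values_positions order, PySem.List.foldl_append_eq_flatMap, List.nil_append,
      List.flatMap_map]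
    have hfun : ∀ v ∈ PySem.Set.ofList order,
        PySem.List.slice (posOf order v) none (some max_e)
          = (posOf order v).take max_e.toNat := by
      intro v _
      rw [← PySem.List.slice_to_natCast (posOf order v) max_e.toNat,
        Int.toNat_of_nonneg (le_of_lt hpos)]
    have hpwK : ((kept order max_e).map Prod.fst).Pairwise (· < ·) :=
      pw_filter_map order _
    rw [List.flatMap_congr hfun,
      PySem.List.sorted_eq_of_perm_of_pairwise_lt _
        ((kept order max_e).map Prod.fst) (fun x => x)
        (keep_perm_K order max_e hpos).symm hpwK,
      map_fst_kept_vals]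

-- ===== VERDICT (by name: the statement is the Claim_ definition above) =====
theorem delete_nth_spec : Claim_equal_delete_nth := by
  intro order max_e _
  unfold Spec_delete_nth
  exact dn_eq order max_e
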